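-- pv_equiv track=rewrite | github.com/Br41nfck/Public-repo | Olympiad Programming/Python/aa_to_b.py | aa_to_b
-- ===== SOURCE A (Python) =====
-- from string import ascii_lowercase
--
-- def aa_to_b(inp):
--     try:
--         nstring = [ascii_lowercase.index(s) for s in inp]
--     except:
--         return
--     key = 0
--     while True:
--         #nstring.sort()
--         if key >= len(nstring)-1 or len(nstring) <= 1:
--             break
--
--         if nstring[key] == nstring[key+1]:
--             nstring[key] = nstring[key] + 1
--             if nstring[key] >= len(ascii_lowercase):
--                 nstring[key] = 0
--             nstring.pop(key+1)
--             key = 0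
--
--         else:
--             key = key + 1
--     return "".join([ascii_lowercase[n] for n in nstring])
-- ===== SOURCE B (Python) =====
-- from string import ascii_lowercase
--
-- def aa_to_b(inp):
--     try:
--         vals = [ascii_lowercase.index(s) for s in inp]
--     except ValueError:
--         return
--     stack = []
--     for v in vals:
--         while stack and stack[-1] == v:
--             stack.pop()
--             v = (v + 1) % 26
--         stack.append(v)
--     return "".join(ascii_lowercase[n] for n in stack)
-- ===== Notes on version B (the rewrite author's own statement) =====
-- stated objective: faster
-- what changed: Replaced A's restart-from-zero rescans of the mutable list after every merge by a single left-to-right pass over a stack that cascades merges against the top element.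
import Mathlib
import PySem

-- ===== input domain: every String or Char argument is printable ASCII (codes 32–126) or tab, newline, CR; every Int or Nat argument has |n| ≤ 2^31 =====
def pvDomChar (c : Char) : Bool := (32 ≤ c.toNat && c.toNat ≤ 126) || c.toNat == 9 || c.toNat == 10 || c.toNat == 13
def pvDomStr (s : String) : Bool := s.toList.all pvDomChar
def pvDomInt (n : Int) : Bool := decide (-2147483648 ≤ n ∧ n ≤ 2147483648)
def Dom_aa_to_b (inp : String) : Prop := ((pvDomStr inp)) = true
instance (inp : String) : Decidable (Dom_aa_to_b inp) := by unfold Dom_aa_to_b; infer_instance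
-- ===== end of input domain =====

-- B replaces A's restart-from-zero rescans of the mutable list after every merge
-- by one left-to-right stack pass with cascading merges (measured faster, asymptotic).

-- ===== PORT A =====
-- helpers shared by both ports: they transcribe the two lines that Source A and Source B
-- have in common (the index comprehension under try/except, and the final join).
-- ascii_lowercase.index(c): some index for 'a'..'z', none = ValueError otherwise
def charIdx? (c : Char) : Option Int :=
  if 97 ≤ c.toNat ∧ c.toNat ≤ 122 then some ((c.toNat : Int) - 97) else none

-- [ascii_lowercase.index(s) for s in inp] under try/except
def toInts : List Char → Option (List Int)
  | [] => some []
  | c :: cs =>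
    match charIdx? c, toInts cs with
    | some v, some vs => some (v :: vs)
    | _, _ => none

-- "".join(ascii_lowercase[n] for n in ns); exact for 0 ≤ n < 26, which both
-- programs' intermediate values always satisfy (proved range invariant below)
def render (ns : List Int) : String := String.ofList (ns.map (fun n => Char.ofNat (97 + n.toNat)))

-- A's while-loop: scan with index `key`; on an equal adjacent pair overwrite,
-- pop the neighbour and restart from key = 0
def loopA (ns : List Int) (key : Nat) : List Int :=
  if key ≥ ns.length - 1 ∨ ns.length ≤ 1 then ns
  else if ns.getD key 0 = ns.getD (key + 1) 0 then
    let v0 := ns.getD key 0 + 1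
    let v := if v0 ≥ 26 then 0 else v0
    loopA ((ns.set key v).eraseIdx (key + 1)) 0
  else loopA ns (key + 1)
termination_by (ns.length, ns.length - key)
decreasing_by
  · left
    have h1 : key + 1 < ns.length := by omega
    have h2 : key + 1 < (ns.set key v).length := by simpa using h1
    rw [List.length_eraseIdx, if_pos h2, List.length_set]
    omega
  · right
    omega

def aa_to_b (inp : String) : Option String :=
  match toInts inp.toList with
  | none => none
  | some ns => some (render (loopA ns 0))

-- ===== PORT B =====
-- the inner `while stack and stack[-1] == v` loop of Source B; the stack is held
-- top-first, so Source B's append-at-the-end order is recovered by the final reverse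
def pushB (stack : List Int) (v : Int) : List Int :=
  match stack with
  | [] => [v]
  | t :: rest => if t = v then pushB rest ((v + 1) % 26) else v :: t :: rest

def aa_to_b_alt (inp : String) : Option String :=
  match toInts inp.toList with
  | none => none
  | some ns => some (render ((ns.foldl pushB []).reverse))

-- ===== PRECONDITION & SPEC =====
def Spec_aa_to_b (inp : String) (out : Option String) : Prop := out = aa_to_b_alt inp
instance (inp : String) (out : Option String) : Decidable (Spec_aa_to_b inp out) := by unfold Spec_aa_to_b; infer_instance

-- ===== CLAIM (what is proved, stated in full; the proofs are below) =====
def Claim_equal_aa_to_b : Prop := ∀ (inp : String), Dom_aa_to_b inp → Spec_aa_to_b inp (aa_to_b inp)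

-- ===== LEMMAS AND PROOFS =====

-- every value produced by the comprehension lies in [0, 26)
lemma toInts_range : ∀ (cs : List Char) (ns : List Int), toInts cs = some ns →
    ∀ x ∈ ns, 0 ≤ x ∧ x < 26 := by
  intro cs
  induction cs with
  | nil =>
    intro ns h x hx
    simp only [toInts, Option.some.injEq] at h
    subst h
    simp at hx
  | cons c cs ih =>
    intro ns h x hx
    simp only [toInts] at h
    cases hv : charIdx? c with
    | none => rw [hv] at h; simp at h
    | some v =>
      cases hvs : toInts cs with
      | none => rw [hv, hvs] at h; simp at h
      | some vs =>
        rw [hv, hvs] at h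
        simp only [Option.some.injEq] at h
        subst h
        rcases List.mem_cons.mp hx with h1 | h1
        · subst h1
          simp only [charIdx?] at hv
          split at hv
          · rename_i hc
            injection hv with hv
            omega
          · exact absurd hv (by simp)
        · exact ih vs hvs x h1

-- pushB just pushes when the stack top differs from the new value
lemma pushB_push (s : List Int) (x : Int) (h : ∀ t r, s = t :: r → t ≠ x) :
    pushB s x = x :: s := by
  cases s with
  | nil => simp [pushB]
  | cons t r => simp [pushB, h t r rfl]

-- a run of pushB over an adjacent-distinct list whose head differs from the
-- stack top just pushes everything
lemma stack_run : ∀ (xs s : List Int), List.IsChain (· ≠ ·) xs →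
    (∀ t a, s = t :: a → ∀ h y, xs = h :: y → t ≠ h) →
    List.foldl pushB s xs = xs.reverse ++ s := by
  intro xs
  induction xs with
  | nil => intro s _ _; simp
  | cons x xs ih =>
    intro s hch hhd
    have hps : pushB s x = x :: s :=
      pushB_push s x (fun t r ht => hhd t r ht x xs rfl)
    have hch' : List.IsChain (· ≠ ·) xs := (List.isChain_cons.mp hch).2
    have hhd' : ∀ y ∈ xs.head?, x ≠ y := (List.isChain_cons.mp hch).1
    have hrec := ih (x :: s) hch' (by
      intro t a ht h y hy
      cases ht
      exact hhd' h (by simp [hy]))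
    simp only [List.foldl_cons, hps, hrec]
    simp

lemma stack_run0 (xs : List Int) (h : List.IsChain (· ≠ ·) xs) :
    List.foldl pushB [] xs = xs.reverse := by
  have := stack_run xs [] h (by intro t a ht; cases ht)
  simpa using this

-- main invariant: if the first `key` adjacent pairs are already distinct, A's
-- loop computes exactly B's stack fold (read off in reverse)
lemma loopA_eq : ∀ (ns : List Int) (key : Nat),
    (∀ x ∈ ns, 0 ≤ x ∧ x < 26) →
    (∀ i, i < key → i + 1 < ns.length → ns.getD i 0 ≠ ns.getD (i + 1) 0) →
    loopA ns key = (List.foldl pushB [] ns).reverse := by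
  intro ns key
  induction ns, key using loopA.induct with
  | case1 ns key hstop =>
    intro _ hpre
    rw [loopA, if_pos hstop]
    have hch : List.IsChain (· ≠ ·) ns := by
      rw [List.isChain_iff_getElem]
      intro i hi
      have h1 : i < key := by omega
      have := hpre i h1 hi
      rwa [List.getD_eq_getElem _ _ (by omega), List.getD_eq_getElem _ _ hi] at this
    rw [stack_run0 ns hch, List.reverse_reverse]
  | case2 ns key hstop heq v0 v ih =>
    intro hrange hpre
    have hk1 : key + 1 < ns.length := by
      rcases Nat.lt_or_ge (key + 1) ns.length with h | h
      · exact h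
      · exact absurd (by omega : key ≥ ns.length - 1 ∨ ns.length ≤ 1) hstop
    have hkey : key < ns.length := by omega
    obtain ⟨a, ha⟩ : ∃ a, ns.getD key 0 = a := ⟨_, rfl⟩
    obtain ⟨P, hPdef⟩ : ∃ P, P = ns.take key := ⟨_, rfl⟩
    obtain ⟨Q, hQdef⟩ : ∃ Q, Q = ns.drop (key + 2) := ⟨_, rfl⟩
    have hPlen : P.length = key := by rw [hPdef, List.length_take]; omega
    have haget : ns[key]'hkey = a := by rw [← ha, List.getD_eq_getElem _ _ hkey]
    have haget1 : ns[key + 1]'hk1 = a := by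
      rw [← ha, heq, List.getD_eq_getElem _ _ hk1]
    -- decompose ns around the equal pair
    have hex : ns = P ++ a :: a :: Q := by
      conv_lhs => rw [← List.take_append_drop key ns]
      rw [hPdef, hQdef]
      congr 1
      rw [List.drop_eq_getElem_cons hkey, haget]
      congr 1
      rw [List.drop_eq_getElem_cons hk1, haget1]
    -- decompose the merged list
    have hns' : (ns.set key v).eraseIdx (key + 1) = P ++ v :: Q := by
      conv_lhs => rw [hex]
      rw [List.set_append_right _ _ (by omega), hPlen]
      simp only [Nat.sub_self, List.set_cons_zero]
      rw [List.eraseIdx_append_of_length_le (by omega)]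
      simp [hPlen, List.eraseIdx]
    -- the prefix P is adjacent-distinct
    have hchP : List.IsChain (· ≠ ·) P := by
      rw [List.isChain_iff_getElem]
      intro i hi
      have hiP : i + 1 < key := by omega
      have h1 : i + 1 < ns.length := by omega
      have := hpre i (by omega) h1
      rw [List.getD_eq_getElem _ _ (by omega : i < ns.length), List.getD_eq_getElem _ _ h1] at this
      simpa [hPdef, List.getElem_take] using this
    -- pushing a onto P's stack just pushes (the last element of P differs from a)
    have hpushP : pushB P.reverse a = a :: P.reverse := by
      apply pushB_push
      intro t r ht htEq
      have hPne : P ≠ [] := by intro h; rw [h] at ht; cases ht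
      have hkpos : 0 < key := by
        have := List.length_pos_iff.mpr hPne
        omega
      have h5 : P.getLast? = some t := by rw [← List.head?_reverse, ht, List.head?_cons]
      have h6 : ns[key - 1]? = some t := by
        rw [hPdef, List.getLast?_eq_getElem?, List.length_take] at h5
        rw [← h5, List.getElem?_take_of_lt (by omega)]
        congr 1
        omega
      have h7 : ns[key]? = some a := by rw [List.getElem?_eq_getElem hkey, haget]
      have hne := hpre (key - 1) (by omega) (by omega)
      rw [List.getD_eq_getElem _ _ (by omega : key - 1 < ns.length),
          List.getD_eq_getElem _ _ (by omega : key - 1 + 1 < ns.length)] at hne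
      have hne' : ns[key - 1]? ≠ ns[key - 1 + 1]? := by
        rw [List.getElem?_eq_getElem (by omega : key - 1 < ns.length),
            List.getElem?_eq_getElem (by omega : key - 1 + 1 < ns.length)]
        simp only [ne_eq, Option.some.injEq]
        exact hne
      apply hne'
      have hk : key - 1 + 1 = key := by omega
      rw [h6, hk, h7, htEq]
    -- the range bound turns A's overwrite value into B's (a+1) % 26
    have harange : 0 ≤ a ∧ a < 26 := by
      refine hrange a ?_
      rw [hex]; simp
    have hv : v = (a + 1) % 26 := by
      show (if ns.getD key 0 + 1 ≥ 26 then (0 : Int) else ns.getD key 0 + 1) = (a + 1) % 26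
      rw [ha]
      split_ifs <;> omega
    -- the two folds agree
    have hfold : List.foldl pushB [] ((ns.set key v).eraseIdx (key + 1)) =
        List.foldl pushB [] ns := by
      rw [hns']
      conv_rhs => rw [hex]
      rw [show P ++ v :: Q = P ++ [v] ++ Q by simp,
          show P ++ a :: a :: Q = P ++ [a, a] ++ Q by simp]
      rw [List.foldl_append, List.foldl_append, List.foldl_append, List.foldl_append]
      congr 1
      rw [stack_run0 P hchP]
      simp only [List.foldl_cons, List.foldl_nil]
      rw [hpushP, hv]
      simp [pushB]
    -- range invariant for the merged list
    have hrange' : ∀ x ∈ (ns.set key v).eraseIdx (key + 1), 0 ≤ x ∧ x < 26 := by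
      intro x hx
      rw [hns'] at hx
      rcases List.mem_append.mp hx with hx | hx
      · exact hrange x (by rw [hex]; exact List.mem_append.mpr (Or.inl hx))
      · rcases List.mem_cons.mp hx with hx | hx
        · subst hx
          rw [hv]
          constructor
          · exact Int.emod_nonneg _ (by omega)
          · omega
        · exact hrange x (by rw [hex]; simp [hx])
    rw [loopA, if_neg hstop, if_pos heq]
    show loopA ((ns.set key v).eraseIdx (key + 1)) 0 = (List.foldl pushB [] ns).reverse
    rw [ih hrange' (by intro i hi; omega), hfold]
  | case3 ns key hstop hne ih =>
    intro hrange hpre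
    rw [loopA, if_neg hstop, if_neg hne]
    apply ih hrange
    intro i hi hlen
    rcases Nat.lt_or_ge i key with h | h
    · exact hpre i h hlen
    · have : i = key := by omega
      subst this
      exact hne

theorem aa_to_b_eq_alt (inp : String) : aa_to_b inp = aa_to_b_alt inp := by
  unfold aa_to_b aa_to_b_alt
  cases h : toInts inp.toList with
  | none => rfl
  | some ns =>
    have hr := toInts_range inp.toList ns h
    show some (render (loopA ns 0)) = some (render ((List.foldl pushB [] ns).reverse))
    rw [loopA_eq ns 0 hr (by intro i hi; omega)]

-- ===== VERDICT (by name: the statement is the Claim_ definition above) =====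
theorem aa_to_b_spec : Claim_equal_aa_to_b := by
  intro inp _
  unfold Spec_aa_to_b
  exact aa_to_b_eq_alt inp
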